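-- pv_equiv track=rewrite | github.com/thiagodfreitasevans/projecteuler | problem5.py | small_evenly_div_n
-- ===== SOURCE A (Python) =====
-- from functools import reduce
--
-- def small_evenly_div_n(n):
--     list1 = []
--     for number in range(1,n):
--         nb = number
--         for element in list1:
--             if nb%element == 0:
--                 nb//=element
--         list1.append(nb)
--     return reduce((lambda x,y: x*y),list1)
-- ===== SOURCE B (Python) =====
-- def small_evenly_div_n(n):
--     # running LCM of 1..n-1: r = r*k // gcd(r,k)
--     r = 1
--     for k in range(2, n):
--         a, b = r, k
--         while b:
--             a, b = b, a % b
--         r = r * k // a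
--     return r
-- ===== Notes on version B (the rewrite author's own statement) =====
-- stated objective: faster
-- what changed: Replaces A's quadratic scheme (each number reduced by an inner scan over the whole list of previously appended factors, then a final product) with a single running-LCM fold r = r*k//gcd(r,k) using Euclid's algorithm.
-- outside the precondition, e.g. on small_evenly_div_n(1): A raises TypeError, B returns 1
import Mathlib
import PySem

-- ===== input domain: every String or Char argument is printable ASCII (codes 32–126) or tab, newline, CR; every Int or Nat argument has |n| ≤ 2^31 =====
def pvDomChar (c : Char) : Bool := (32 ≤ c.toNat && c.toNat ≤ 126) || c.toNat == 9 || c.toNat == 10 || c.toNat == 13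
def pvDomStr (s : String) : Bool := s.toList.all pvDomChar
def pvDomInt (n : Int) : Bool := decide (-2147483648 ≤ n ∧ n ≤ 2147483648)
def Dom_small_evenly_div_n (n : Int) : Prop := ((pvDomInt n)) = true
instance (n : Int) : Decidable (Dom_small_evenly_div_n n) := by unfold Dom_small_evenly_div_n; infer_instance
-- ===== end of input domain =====

-- B replaces A's quadratic reduced-factor list with a single running-LCM fold (faster, asymptotic).


-- ===== PORT A =====
-- literal transliteration of A: build list1 by reducing each number by every earlier
-- element, then multiply everything (Python's reduce raises on the empty list: excluded by Pre_,
-- the port returns 0 there).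
def small_evenly_div_n (n : Int) : Int :=
  let list1 := (PySem.List.pyRange 1 n 1).foldl (fun list1 number =>
    let nb := list1.foldl
      (fun nb element => if PySem.Int.mod nb element = 0 then PySem.Int.floordiv nb element else nb)
      number
    list1 ++ [nb]) []
  match list1 with
  | [] => 0            -- Python: TypeError from reduce; outside Pre_
  | x :: xs => xs.foldl (· * ·) x

-- ===== PORT B =====
-- hand-written Euclid loop of Source B (while b: a, b = b, a % b)
def pyGcd (a b : Int) : Int :=
  if _hb : b ≠ 0 then pyGcd b (PySem.Int.mod a b) else a
termination_by b.natAbs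
decreasing_by
  have h1 := PySem.Int.mod_nonneg a (b := b)
  have h2 := PySem.Int.mod_lt a (b := b)
  have h3 := PySem.Int.mod_neg_bounds a (b := b)
  rcases lt_or_gt_of_ne _hb with hb' | hb'
  · have := h3 hb'; omega
  · have := h1 hb'; have := h2 hb'; omega

def small_evenly_div_n_alt (n : Int) : Int :=
  (PySem.List.pyRange 2 n 1).foldl
    (fun r k => PySem.Int.floordiv (r * k) (pyGcd r k)) 1

-- ===== PRECONDITION & SPEC =====
-- Pre_ excludes exactly n ≤ 1, where range(1,n) is empty and A's reduce raises TypeError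
-- (B returns 1 there); no input on which A returns a value is excluded.
def Pre_small_evenly_div_n (n : Int) : Prop := 2 ≤ n
instance (n : Int) : Decidable (Pre_small_evenly_div_n n) := by
  unfold Pre_small_evenly_div_n; infer_instance
def pvWitness_small_evenly_div_n : Int := 6

def Spec_small_evenly_div_n (n : Int) (out : Int) : Prop := out = small_evenly_div_n_alt n
instance (n : Int) (out : Int) : Decidable (Spec_small_evenly_div_n n out) := by
  unfold Spec_small_evenly_div_n; infer_instance

-- ===== CLAIM (what is proved, stated in full; the proofs are below) =====
def Claim_equal_small_evenly_div_n : Prop := ∀ (n : Int), Dom_small_evenly_div_n n → Pre_small_evenly_div_n n → Spec_small_evenly_div_n n (small_evenly_div_n n)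

-- ===== LEMMAS AND PROOFS =====

-- Nat model of A's loop -------------------------------------------------
def redStep (nb e : Nat) : Nat := if nb % e = 0 then nb / e else nb

def red (nb : Nat) (xs : List Nat) : Nat := xs.foldl redStep nb

def alist : Nat → List Nat
  | 0 => []
  | m + 1 => alist m ++ [red (m + 1) (alist m)]

-- Nat model of B: running lcm of 1..m
def Lm : Nat → Nat
  | 0 => 1
  | m + 1 => Nat.lcm (Lm m) (m + 1)

lemma Lm_pos (m : Nat) : 0 < Lm m := by
  induction m with
  | zero => simp [Lm]
  | succ m ih =>
    simp only [Lm]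
    exact Nat.pos_of_ne_zero (Nat.lcm_ne_zero ih.ne' (by omega))

lemma dvd_Lm (m j : Nat) (hj0 : 0 < j) (hjm : j ≤ m) : j ∣ Lm m := by
  induction m with
  | zero => omega
  | succ m ih =>
    rcases Nat.lt_or_ge j (m + 1) with h | h
    · exact (ih (by omega)).trans (Nat.dvd_lcm_left _ _)
    · have : j = m + 1 := by omega
      subst this; exact Nat.dvd_lcm_right _ _

lemma pow_dvd_lcm (p e a b : Nat) (hp : p.Prime) (ha : a ≠ 0) (hb : b ≠ 0)
    (h : p ^ e ∣ Nat.lcm a b) : p ^ e ∣ a ∨ p ^ e ∣ b := by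
  have hl : Nat.lcm a b ≠ 0 := Nat.lcm_ne_zero ha hb
  rw [hp.pow_dvd_iff_le_factorization hl, Nat.factorization_lcm ha hb] at h
  simp only [Finsupp.sup_apply, le_sup_iff] at h
  rcases h with h | h
  · exact Or.inl ((hp.pow_dvd_iff_le_factorization ha).mpr h)
  · exact Or.inr ((hp.pow_dvd_iff_le_factorization hb).mpr h)

lemma pow_dvd_Lm (m p e : Nat) (hp : p.Prime) (he : 0 < e) (h : p ^ e ∣ Lm m) :
    ∃ j, 0 < j ∧ j ≤ m ∧ p ^ e ∣ j := by
  induction m with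
  | zero =>
    simp [Lm] at h
    have := hp.one_lt
    rcases h with h | h <;> omega
  | succ m ih =>
    simp only [Lm] at h
    rcases pow_dvd_lcm p e _ _ hp (Lm_pos m).ne' (by omega) h with h | h
    · obtain ⟨j, h1, h2, h3⟩ := ih h
      exact ⟨j, h1, by omega, h3⟩
    · exact ⟨m + 1, by omega, le_refl _, h⟩

-- red computes division by gcd, when all list elements are 1 or prime
lemma red_eq_div_gcd (xs : List Nat) (h1 : ∀ e ∈ xs, e = 1 ∨ e.Prime) :
    ∀ nb : Nat, 0 < nb → red nb xs = nb / Nat.gcd xs.prod nb := by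
  induction xs with
  | nil => intro nb _; simp [red]
  | cons e rest ih =>
    intro nb hnb
    have hrest : ∀ x ∈ rest, x = 1 ∨ x.Prime := fun x hx => h1 x (by simp [hx])
    rcases h1 e (by simp) with he | hp
    · subst he
      simp only [red, List.foldl_cons, redStep, Nat.mod_one, Nat.div_one,
        List.prod_cons, one_mul]
      exact ih hrest nb hnb
    · by_cases hdvd : e ∣ nb
      · have hnbp : 0 < nb / e := Nat.div_pos (Nat.le_of_dvd hnb hdvd) hp.pos
        have : red nb (e :: rest) = red (nb / e) rest := by
          simp [red, redStep, Nat.mod_eq_zero_of_dvd hdvd]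
        rw [this, ih hrest _ hnbp, List.prod_cons]
        obtain ⟨c, hc⟩ := hdvd
        subst hc
        rw [Nat.mul_div_cancel_left c hp.pos, Nat.gcd_mul_left,
          Nat.mul_div_mul_left _ _ hp.pos]
      · have : red nb (e :: rest) = red nb rest := by
          simp only [red, List.foldl_cons, redStep]
          rw [if_neg (by simpa [Nat.dvd_iff_mod_eq_zero] using hdvd)]
        rw [this, ih hrest nb hnb, List.prod_cons]
        congr 1
        exact (Nat.Coprime.gcd_mul_left_cancel rest.prod
          ((Nat.Prime.coprime_iff_not_dvd hp).mpr hdvd)).symm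

-- the new element appended for k = m+1 is 1 or a prime
lemma quot_one_or_prime (m : Nat) :
    (m + 1) / Nat.gcd (Lm m) (m + 1) = 1 ∨ ((m + 1) / Nat.gcd (Lm m) (m + 1)).Prime := by
  rcases Nat.eq_zero_or_pos m with hm | hm
  · subst hm; left; simp [Lm]
  by_cases hpp : IsPrimePow (m + 1)
  · -- k = p^e: the gcd is p^(e-1) and the quotient is p
    obtain ⟨p, e, hp, he, hk⟩ := hpp
    have hp' : p.Prime := hp.nat_prime
    right
    have hg1 : p ^ (e - 1) ∣ Nat.gcd (Lm m) (m + 1) := by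
      refine Nat.dvd_gcd (dvd_Lm m _ (pow_pos hp'.pos _) ?_) ?_
      · have : p ^ (e - 1) < p ^ e := Nat.pow_lt_pow_right hp'.one_lt (by omega)
        omega
      · exact hk ▸ Nat.pow_dvd_pow p (by omega)
    have hg2 : Nat.gcd (Lm m) (m + 1) ∣ p ^ (e - 1) := by
      have hdk : Nat.gcd (Lm m) (m + 1) ∣ p ^ e := hk ▸ Nat.gcd_dvd_right _ _
      obtain ⟨i, hi, hgi⟩ := (Nat.dvd_prime_pow hp').mp hdk
      have hie : i ≠ e := by
        intro hie
        subst hie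
        have : p ^ i ∣ Lm m := hgi ▸ Nat.gcd_dvd_left _ _
        obtain ⟨j, hj0, hjm, hjd⟩ := pow_dvd_Lm m p i hp' (by omega) this
        have := Nat.le_of_dvd hj0 hjd
        omega
      exact hgi ▸ Nat.pow_dvd_pow p (by omega)
    have hg : Nat.gcd (Lm m) (m + 1) = p ^ (e - 1) := Nat.dvd_antisymm hg2 hg1
    rw [hg, ← hk, Nat.pow_div (by omega) hp'.pos,
      Nat.sub_sub_self (by omega : 1 ≤ e), pow_one]
    exact hp'
  · -- k is not a prime power: k divides Lm m, quotient is 1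
    left
    have hdvd : (m + 1) ∣ Lm m := by
      refine (Nat.dvd_iff_prime_pow_dvd_dvd (Lm m) (m + 1)).mpr ?_
      intro p i hp hpk
      rcases Nat.eq_zero_or_pos i with hi | hi
      · subst hi; simp
      have hE : i ≤ (m + 1).factorization p :=
        (Nat.Prime.pow_dvd_iff_le_factorization hp (by omega)).mp hpk
      have hop : p ^ ((m + 1).factorization p) ∣ (m + 1) := Nat.ordProj_dvd _ _
      have hne : p ^ ((m + 1).factorization p) ≠ m + 1 := by
        intro h
        exact hpp ⟨p, _, hp.prime, by omega, h⟩
      have hlt : p ^ ((m + 1).factorization p) < m + 1 :=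
        lt_of_le_of_ne (Nat.le_of_dvd (by omega) hop) hne
      exact (Nat.pow_dvd_pow p hE).trans
        (dvd_Lm m _ (pow_pos hp.pos _) (by omega))
    rw [Nat.gcd_eq_right hdvd, Nat.div_self (by omega)]

-- key invariant for A's loop
lemma alist_invariant (m : Nat) :
    (alist m).prod = Lm m ∧ ∀ e ∈ alist m, e = 1 ∨ e.Prime := by
  induction m with
  | zero => exact ⟨rfl, by simp [alist]⟩
  | succ m ih =>
    obtain ⟨hprod, hmem⟩ := ih
    have hred : red (m + 1) (alist m) = (m + 1) / Nat.gcd (Lm m) (m + 1) := by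
      rw [red_eq_div_gcd (alist m) hmem (m + 1) (by omega), hprod]
    constructor
    · simp only [alist, List.prod_append, List.prod_cons, List.prod_nil, mul_one, hprod, hred]
      rw [Lm, Nat.lcm, Nat.mul_div_assoc _ (Nat.gcd_dvd_right (Lm m) (m + 1))]
    · intro e hemem
      simp only [alist, List.mem_append, List.mem_cons, List.not_mem_nil, or_false] at hemem
      rcases hemem with h | h
      · exact hmem e h
      · subst h; rw [hred]; exact quot_one_or_prime m

-- casts ------------------------------------------------------------------
lemma pyGcd_natCast (b a : Nat) : pyGcd (a : Int) (b : Int) = (Nat.gcd a b : Int) := by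
  induction b using Nat.strong_induction_on generalizing a with
  | _ b ih =>
    by_cases hb : b = 0
    · subst hb; rw [pyGcd]; simp
    · rw [pyGcd]
      have hbz : ((b : Int) ≠ 0) := by exact_mod_cast hb
      rw [dif_pos hbz, PySem.Int.mod_natCast]
      rw [ih (a % b) (Nat.mod_lt _ (by omega)) b]
      exact congrArg _ ((Nat.gcd_comm b (a % b)).trans
        ((Nat.gcd_rec b a).symm.trans (Nat.gcd_comm b a)))

lemma red_natCast (xs : List Nat) (h0 : 0 ∉ xs) : ∀ nb : Nat,
    (xs.map (fun x : Nat => (x : Int))).foldl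
      (fun nb element => if PySem.Int.mod nb element = 0 then PySem.Int.floordiv nb element else nb)
      (nb : Int) = ((red nb xs : Nat) : Int) := by
  induction xs with
  | nil => intro nb; rfl
  | cons e rest ih =>
    intro nb
    have he : e ≠ 0 := fun h => h0 (h ▸ List.mem_cons_self ..)
    have h0' : 0 ∉ rest := fun h => h0 (List.mem_cons_of_mem e h)
    simp only [List.map_cons, List.foldl_cons, PySem.Int.mod_natCast, PySem.Int.floordiv_natCast]
    by_cases hd : nb % e = 0
    · rw [if_pos (by exact_mod_cast congrArg (Nat.cast : Nat → Int) hd), ih h0']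
      simp [red, redStep, hd]
    · rw [if_neg (by exact_mod_cast fun h => hd (Nat.cast_injective h)), ih h0']
      simp [red, redStep, hd]

-- A's loop over pyRange 1 (1+m) equals the Nat model
lemma afold_eq (m : Nat) :
    (PySem.List.pyRange 1 (1 + (m : Int)) 1).foldl (fun list1 number =>
      list1 ++ [list1.foldl
        (fun nb element => if PySem.Int.mod nb element = 0 then PySem.Int.floordiv nb element else nb)
        number]) []
    = (alist m).map (fun x : Nat => (x : Int)) := by
  induction m with
  | zero => rw [PySem.List.pyRange_one_eq_nil (by omega)]; rfl
  | succ m ih =>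
    have h1 : 1 + ((m : Int) + 1) = (1 + (m : Int)) + 1 := by ring
    rw [Nat.cast_add, Nat.cast_one, h1,
      PySem.List.pyRange_one_succ_right (by omega), List.foldl_append, ih]
    simp only [List.foldl_cons, List.foldl_nil, alist, List.map_append, List.map_cons,
      List.map_nil]
    congr 1
    have h0 : 0 ∉ alist m := by
      intro h
      rcases (alist_invariant m).2 0 h with h' | h'
      · omega
      · exact h'.ne_zero rfl
    have hr := red_natCast (alist m) h0 (m + 1)
    simp only [Nat.cast_add, Nat.cast_one] at hr
    rw [show (1 + (m : Int)) = (m : Int) + 1 from by omega, hr]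

-- B's loop over pyRange 2 n equals Lm
lemma bfold_eq (m : Nat) (hm : 1 ≤ m) :
    (PySem.List.pyRange 2 (1 + (m : Int)) 1).foldl
      (fun r k => PySem.Int.floordiv (r * k) (pyGcd r k)) 1 = ((Lm m : Nat) : Int) := by
  induction m with
  | zero => omega
  | succ m ih =>
    rcases Nat.eq_zero_or_pos m with hm0 | hm0
    · subst hm0
      rw [show (1 + ((1 : Nat) : Int)) = 2 by norm_num, PySem.List.pyRange_one_eq_nil (by omega)]
      rfl
    · have h1 : 1 + (((m : Nat) + 1 : Nat) : Int) = (1 + (m : Int)) + 1 := by push_cast; ring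
      rw [h1, PySem.List.pyRange_one_succ_right (by omega), List.foldl_append, ih hm0]
      simp only [List.foldl_cons, List.foldl_nil]
      have h2 : (1 + (m : Int)) = (((m + 1 : Nat) : Nat) : Int) := by push_cast; ring
      rw [h2, pyGcd_natCast, ← Nat.cast_mul, PySem.Int.floordiv_natCast]
      rfl

lemma foldl_mul_eq_prod (xs : List Int) : ∀ x : Int, xs.foldl (· * ·) x = x * xs.prod := by
  induction xs with
  | nil => intro x; simp
  | cons y ys ih => intro x; simp [List.foldl_cons, ih, mul_assoc]

-- ===== VERDICT (by name: the statement is the Claim_ definition above) =====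
theorem small_evenly_div_n_spec : Claim_equal_small_evenly_div_n := by
  intro n _ hpre
  unfold Pre_small_evenly_div_n at hpre
  unfold Spec_small_evenly_div_n small_evenly_div_n small_evenly_div_n_alt
  obtain ⟨m, hm1, hn⟩ : ∃ m : Nat, 1 ≤ m ∧ n = 1 + (m : Int) :=
    ⟨(n - 1).toNat, by omega, by omega⟩
  rw [hn, afold_eq m, bfold_eq m hm1]
  have hne : alist m ≠ [] := by
    cases m with
    | zero => omega
    | succ k => simp [alist]
  obtain ⟨x, xs, hx⟩ := List.exists_cons_of_ne_nil hne
  rw [hx]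
  simp only [List.map_cons]
  rw [foldl_mul_eq_prod]
  have : ((x : Int)) * (xs.map (fun x : Nat => (x : Int))).prod
      = (((x :: xs).prod : Nat) : Int) := by
    rw [List.prod_cons, Nat.cast_mul, Nat.cast_list_prod]
  rw [this, ← hx, (alist_invariant m).1]
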